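-- pv_equiv track=rewrite | github.com/tbvanderwoude/advent-of-code-2023 | day_12.py | construct_patterns_len
-- ===== SOURCE A (Python) =====
-- from typing import List
--
-- def construct_base_pattern(groups):
--     tokens = ["#" * group for group in groups]
--     return ".".join(tokens)
--
-- def is_match(ref, pat):
--     return all([c_r == "?" or c_r == c_p for (c_r, c_p) in zip(ref, pat)])
--
-- def construct_patterns_len(groups: List[int], ref_p: str) -> List[str]:
--     l = len(ref_p)
--     if groups == []:
--         patt = "." * l
--         if is_match(ref_p,patt):
--             return [patt]
--         else:
--             return []
--     base_len = sum(groups) + len(groups) - 1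
--     budget = l - base_len
--     if budget == 0:
--         base_pattern = construct_base_pattern(groups)
--         if is_match(ref_p,base_pattern):
--             return [base_pattern]
--         else:
--             return []
--     if budget < 0:
--         return []
--     else:
--         h, t = groups[0], groups[1:]
--         all_sols = []
--         for i in range(budget+1):
--             prefix = "." * i + "#" * h
--             if len(groups) > 1:
--                 prefix += '.'
--             n_p = len(prefix)
--             if is_match(ref_p[:n_p], prefix):
--                 tail_sol = construct_patterns_len(t, ref_p[n_p:])
--                 all_sols.extend([prefix + s for s in tail_sol])
--         return all_sols
-- ===== SOURCE B (Python) =====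
-- from typing import List
--
-- def construct_patterns_len(groups: List[int], ref_p: str) -> List[str]:
--     # Top-down memoization on (group-suffix index, string position): each
--     # subproblem's solution list is computed once and reused.
--     l = len(ref_p)
--     n = len(groups)
--     cache = {}
--
--     def ok(pos, pat):
--         return all(c == "?" or c == p for c, p in zip(ref_p[pos:], pat))
--
--     def solve(j, pos):
--         key = (j, pos)
--         if key in cache:
--             return cache[key]
--         if j == n:
--             patt = "." * (l - pos)
--             res = [patt] if ok(pos, patt) else []
--         else:
--             base_len = sum(groups[j:]) + (n - j) - 1
--             budget = (l - pos) - base_len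
--             if budget == 0:
--                 patt = ".".join("#" * g for g in groups[j:])
--                 res = [patt] if ok(pos, patt) else []
--             elif budget < 0:
--                 res = []
--             else:
--                 h = groups[j]
--                 res = []
--                 for i in range(budget + 1):
--                     prefix = "." * i + "#" * h
--                     if n - j > 1:
--                         prefix += "."
--                     if ok(pos, prefix):
--                         tail = solve(j + 1, min(pos + len(prefix), l))
--                         res.extend(prefix + s for s in tail)
--         cache[key] = res
--         return res
--
--     return solve(0, 0)
-- ===== Notes on version B (the rewrite author's own statement) =====
-- stated objective: alternative
-- what changed: Replaces A's plain top-down recursion by a memoized recursion keyed on (group-suffix index, string position), threading a cache so each subproblem's solution list is computed once and reused.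
import Mathlib
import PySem

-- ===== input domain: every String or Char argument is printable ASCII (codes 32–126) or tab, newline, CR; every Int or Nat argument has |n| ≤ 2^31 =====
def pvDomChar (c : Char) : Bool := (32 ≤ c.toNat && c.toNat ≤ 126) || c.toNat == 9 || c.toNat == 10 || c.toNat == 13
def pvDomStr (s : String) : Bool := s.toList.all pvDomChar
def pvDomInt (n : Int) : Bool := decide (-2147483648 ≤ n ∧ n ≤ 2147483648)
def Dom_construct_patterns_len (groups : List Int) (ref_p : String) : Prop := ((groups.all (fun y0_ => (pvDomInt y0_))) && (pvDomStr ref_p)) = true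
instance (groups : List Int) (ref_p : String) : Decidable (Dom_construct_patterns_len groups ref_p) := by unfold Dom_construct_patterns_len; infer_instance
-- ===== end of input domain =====

-- B memoizes A's recursion on a cache keyed by (group-suffix index, string position):
-- an alternative formulation that computes each subproblem's solution list once.

-- ===== PORT A =====
-- strings are ported as their List Char contents; "x" * n with a possibly negative
-- Python int n is List.replicate n.toNat (toNat clamps negatives to 0, as Python does)

-- is_match(ref, pat): all([c_r == "?" or c_r == c_p for (c_r, c_p) in zip(ref, pat)])
def pvIsMatch (ref pat : List Char) : Bool :=
  ((ref.zip pat).map (fun p => p.1 == '?' || p.1 == p.2)).all (fun b => b)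

-- construct_base_pattern(groups): ".".join("#" * g for g in groups)
def pvBasePattern (groups : List Int) : List Char :=
  PySem.Chars.join ['.'] (groups.map (fun g => List.replicate g.toNat '#'))

-- the recursion of construct_patterns_len, on the char-list contents of ref_p
def pvACore : List Int → List Char → List (List Char)
  | [], ref =>
      let patt := List.replicate ref.length '.'
      if pvIsMatch ref patt then [patt] else []
  | h :: t, ref =>
      let base_len : Int := (h :: t).sum + (h :: t).length - 1
      let budget : Int := (ref.length : Int) - base_len
      if budget = 0 then
        let bp := pvBasePattern (h :: t)
        if pvIsMatch ref bp then [bp] else []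
      else if budget < 0 then []
      else
        (PySem.List.pyRange 0 (budget + 1) 1).foldl
          (fun acc i =>
            let pfx := List.replicate i.toNat '.' ++ List.replicate h.toNat '#'
                        ++ (if 1 < (h :: t).length then ['.'] else [])
            let n_p := pfx.length
            if pvIsMatch (PySem.List.slice ref none (some (n_p : Int))) pfx then
              acc ++ (pvACore t (PySem.List.slice ref (some (n_p : Int)) none)).map
                        (fun s => pfx ++ s)
            else acc) []
  termination_by groups _ => groups.length
  decreasing_by simp

def construct_patterns_len (groups : List Int) (ref_p : String) : List String :=
  (pvACore groups ref_p.toList).map (fun cs => String.ofList cs)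

-- ===== PORT B =====
-- ok(pos, pat): all(c == "?" or c == p for c, p in zip(ref_p[pos:], pat))
def pvOk (ref : List Char) (pos : Nat) (pat : List Char) : Bool :=
  ((PySem.List.slice ref (some (pos : Int)) none).zip pat).all
    (fun p => p.1 == '?' || p.1 == p.2)

-- solve(j, pos) of Source B; the remaining groups groups[j:] are passed as the list gs,
-- so the cache key (j, pos) is (n - len(gs), pos); the cache is threaded through
-- (pvSolveBody is solve's body on a cache miss, split out for the termination measure)
mutual

def pvSolve (n : Nat) (ref : List Char) (gs : List Int) (pos : Nat)
    (cache : PySem.Dict (Int × Int) (List (List Char))) :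
    List (List Char) × PySem.Dict (Int × Int) (List (List Char)) :=
  let key : Int × Int := ((n : Int) - (gs.length : Int), (pos : Int))
  match cache.get? key with
  | some v => (v, cache)
  | none =>
      let rc := pvSolveBody n ref gs pos cache
      (rc.1, rc.2.insert key rc.1)
  termination_by (gs.length, 1)

def pvSolveBody (n : Nat) (ref : List Char) (gs : List Int) (pos : Nat)
    (cache : PySem.Dict (Int × Int) (List (List Char))) :
    List (List Char) × PySem.Dict (Int × Int) (List (List Char)) :=
  match gs with
  | [] =>
      let patt := List.replicate (ref.length - pos) '.'
      (if pvOk ref pos patt then [patt] else [], cache)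
  | h :: t =>
      let base_len : Int := (h :: t).sum + ((h :: t).length : Int) - 1
      let budget : Int := ((ref.length : Int) - (pos : Int)) - base_len
      if budget = 0 then
        let patt := PySem.Chars.join ['.']
                      ((h :: t).map (fun g => List.replicate g.toNat '#'))
        (if pvOk ref pos patt then [patt] else [], cache)
      else if budget < 0 then ([], cache)
      else
        (PySem.List.pyRange 0 (budget + 1) 1).foldl
          (fun st i =>
            let pfx := List.replicate i.toNat '.' ++ List.replicate h.toNat '#'
                        ++ (if 1 < (h :: t).length then ['.'] else [])
            if pvOk ref pos pfx then
              let tc := pvSolve n ref t (min (pos + pfx.length) ref.length) st.2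
              (st.1 ++ tc.1.map (fun s => pfx ++ s), tc.2)
            else st) ([], cache)
  termination_by (gs.length, 0)
  decreasing_by all_goals simp [Prod.lex_def]

end

def construct_patterns_len_alt (groups : List Int) (ref_p : String) : List String :=
  ((pvSolve groups.length ref_p.toList groups 0 PySem.Dict.empty).1).map
    (fun cs => String.ofList cs)

-- ===== PRECONDITION & SPEC =====
def Spec_construct_patterns_len (groups : List Int) (ref_p : String) (out : List String) : Prop := out = construct_patterns_len_alt groups ref_p
instance (groups : List Int) (ref_p : String) (out : List String) : Decidable (Spec_construct_patterns_len groups ref_p out) := by unfold Spec_construct_patterns_len; infer_instance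

-- ===== CLAIM (what is proved, stated in full; the proofs are below) =====
def Claim_equal_construct_patterns_len : Prop := ∀ (groups : List Int) (ref_p : String), Dom_construct_patterns_len groups ref_p → Spec_construct_patterns_len groups ref_p (construct_patterns_len groups ref_p)

-- ===== LEMMAS AND PROOFS =====

-- B's ok is A's is_match read at an offset
lemma pvOk_eq (ref : List Char) (pos : Nat) (pat : List Char) :
    pvOk ref pos pat = pvIsMatch (ref.drop pos) pat := by
  simp only [pvOk, pvIsMatch, PySem.List.slice_from_natCast, List.all_map]
  rfl

-- dropping a clamped amount is dropping the amount
lemma drop_min_length (ref : List Char) (a : Nat) :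
    ref.drop (min a ref.length) = ref.drop a := by
  rcases le_total a ref.length with h | h
  · rw [min_eq_left h]
  · rw [min_eq_right h, List.drop_of_length_le h, List.drop_of_length_le le_rfl]

lemma zip_take_left (l1 l2 : List Char) : (l1.take l2.length).zip l2 = l1.zip l2 := by
  induction l1 generalizing l2 with
  | nil => simp
  | cons a l1 ih =>
      cases l2 with
      | nil => simp
      | cons b l2 => simp [ih]

lemma pvIsMatch_take (l pat : List Char) :
    pvIsMatch (l.take pat.length) pat = pvIsMatch l pat := by
  unfold pvIsMatch
  rw [zip_take_left]

-- every cache entry is the correct A-answer of the subproblem its key names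
def pvGood (all : List Int) (ref : List Char)
    (cache : PySem.Dict (Int × Int) (List (List Char))) : Prop :=
  ∀ (a b : Int) (v : List (List Char)), cache.get? (a, b) = some v →
    ∃ (j p : Nat), a = (j : Int) ∧ b = (p : Int) ∧
      v = pvACore (all.drop j) (ref.drop p)

lemma pvGood_empty (all : List Int) (ref : List Char) :
    pvGood all ref PySem.Dict.empty := by
  intro a b v hv
  simp [PySem.Dict.get?_empty] at hv

-- the base case of the two recursions agree
lemma pvBody_nil (ref : List Char) (pos : Nat) :
    (if pvOk ref pos (List.replicate (ref.length - pos) '.')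
       then [List.replicate (ref.length - pos) '.'] else [])
      = pvACore ([] : List Int) (ref.drop pos) := by
  simp only [pvACore, pvOk_eq, List.length_drop]

lemma pvSolveBody_correct (all : List Int) (ref : List Char) (h : Int) (t : List Int)
    (ih : ∀ (pos : Nat) (cache : PySem.Dict (Int × Int) (List (List Char))),
        pos ≤ ref.length → pvGood all ref cache →
        (pvSolve all.length ref t pos cache).1 = pvACore t (ref.drop pos) ∧
        pvGood all ref (pvSolve all.length ref t pos cache).2)
    (pos : Nat) (cache : PySem.Dict (Int × Int) (List (List Char)))
    (hpos : pos ≤ ref.length) (hgood : pvGood all ref cache) :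
    (pvSolveBody all.length ref (h :: t) pos cache).1 = pvACore (h :: t) (ref.drop pos) ∧
    pvGood all ref (pvSolveBody all.length ref (h :: t) pos cache).2 := by
  rw [pvSolveBody, pvACore]
  have hlen : ((ref.drop pos).length : Int) = (ref.length : Int) - (pos : Int) := by
    simp; omega
  have hdrop : ∀ (n_p : Nat),
      ref.drop (min (pos + n_p) ref.length) = (ref.drop pos).drop n_p := by
    intro n_p
    rw [drop_min_length, List.drop_drop]
  simp only [hlen, pvBasePattern, pvOk_eq]
  by_cases h0 : ((ref.length : Int) - (pos : Int))
      - ((h :: t).sum + ((h :: t).length : Int) - 1) = 0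
  · simp only [if_pos h0]
    exact ⟨by trivial, hgood⟩
  · simp only [if_neg h0]
    by_cases hneg : ((ref.length : Int) - (pos : Int))
        - ((h :: t).sum + ((h :: t).length : Int) - 1) < 0
    · simp only [if_pos hneg]
      exact ⟨by trivial, hgood⟩
    · simp only [if_neg hneg]
      -- budget > 0: the memoized fold computes A's fold, keeping the cache good
      have hfold : ∀ (is : List Int) (acc : List (List Char))
        (c : PySem.Dict (Int × Int) (List (List Char))), pvGood all ref c →
        ((is.foldl
            (fun st i =>
              let pfx := List.replicate i.toNat '.' ++ List.replicate h.toNat '#'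
                          ++ (if 1 < (h :: t).length then ['.'] else [])
              if pvIsMatch (ref.drop pos) pfx then
                let tc := pvSolve all.length ref t (min (pos + pfx.length) ref.length) st.2
                (st.1 ++ tc.1.map (fun s => pfx ++ s), tc.2)
              else st) (acc, c)).1
          = is.foldl
              (fun acc i =>
                let pfx := List.replicate i.toNat '.' ++ List.replicate h.toNat '#'
                            ++ (if 1 < (h :: t).length then ['.'] else [])
                let n_p := pfx.length
                if pvIsMatch (PySem.List.slice (ref.drop pos) none (some (n_p : Int))) pfx then
                  acc ++ (pvACore t (PySem.List.slice (ref.drop pos) (some (n_p : Int)) none)).map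
                            (fun s => pfx ++ s)
                else acc) acc) ∧
        pvGood all ref ((is.foldl
            (fun st i =>
              let pfx := List.replicate i.toNat '.' ++ List.replicate h.toNat '#'
                          ++ (if 1 < (h :: t).length then ['.'] else [])
              if pvIsMatch (ref.drop pos) pfx then
                let tc := pvSolve all.length ref t (min (pos + pfx.length) ref.length) st.2
                (st.1 ++ tc.1.map (fun s => pfx ++ s), tc.2)
              else st) (acc, c)).2) := by
        intro is
        induction is with
        | nil => intro acc c hc; exact ⟨rfl, hc⟩
        | cons i is ihs =>
            intro acc c hc
            simp only [List.foldl_cons]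
            rw [PySem.List.slice_to_natCast, PySem.List.slice_from_natCast, pvIsMatch_take]
            by_cases hmatch : pvIsMatch (ref.drop pos)
                (List.replicate i.toNat '.' ++ List.replicate h.toNat '#'
                  ++ (if 1 < (h :: t).length then ['.'] else [])) = true
            · simp only [hmatch, if_pos]
              obtain ⟨h1, h2⟩ := ih (min (pos + (List.replicate i.toNat '.'
                  ++ List.replicate h.toNat '#'
                  ++ (if 1 < (h :: t).length then ['.'] else [])).length) ref.length) c
                (min_le_right _ _) hc
              rw [h1, hdrop]
              exact ihs _ _ h2
            · simp only [hmatch, if_neg, Bool.false_eq_true, not_false_iff]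
              exact ihs _ _ hc
      exact hfold _ [] cache hgood

lemma pvSolve_correct (all : List Int) (ref : List Char) :
    ∀ (gs : List Int) (pos : Nat) (cache : PySem.Dict (Int × Int) (List (List Char))),
      all.drop (all.length - gs.length) = gs →
      pos ≤ ref.length →
      pvGood all ref cache →
      (pvSolve all.length ref gs pos cache).1 = pvACore gs (ref.drop pos) ∧
      pvGood all ref (pvSolve all.length ref gs pos cache).2 := by
  intro gs
  induction gs with
  | nil =>
      intro pos cache hsuf hpos hgood
      rw [pvSolve]
      cases hget : cache.get? ((all.length : Int) - (([] : List Int).length : Int),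
          (pos : Int)) with
      | some v =>
          simp only []
          obtain ⟨j, p, hj, hp, hv⟩ := hgood _ _ _ hget
          have hj' : j = all.length := by simp at hj; omega
          have hp' : p = pos := by exact_mod_cast hp.symm
          subst hj' hp'
          refine ⟨?_, hgood⟩
          rw [hv, List.drop_length]
      | none =>
          simp only []
          constructor
          · rw [pvSolveBody]
            exact pvBody_nil ref pos
          · have hbody2 : (pvSolveBody all.length ref [] pos cache).2 = cache := by
              rw [pvSolveBody]
            have hbody1 : (pvSolveBody all.length ref [] pos cache).1
                = pvACore ([] : List Int) (ref.drop pos) := by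
              rw [pvSolveBody]
              exact pvBody_nil ref pos
            intro a b v hv
            rw [hbody2, PySem.Dict.get?_insert] at hv
            split_ifs at hv with hk
            · simp only [Prod.mk.injEq] at hk
              obtain ⟨ha, hb⟩ := hk
              refine ⟨all.length, pos, by rw [ha]; simp, hb, ?_⟩
              have hv' : v = (pvSolveBody all.length ref [] pos cache).1 :=
                (Option.some.inj hv).symm
              rw [hv', List.drop_length, hbody1]
            · exact hgood _ _ _ hv
  | cons h t ih =>
      intro pos cache hsuf hpos hgood
      have hlen_le : (h :: t).length ≤ all.length := by
        have h3 : (h :: t).length = all.length - (all.length - (h :: t).length) := by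
          conv_lhs => rw [← hsuf]
          rw [List.length_drop]
        omega
      have hsuft : all.drop (all.length - t.length) = t := by
        have h1 : all.length - t.length = (all.length - (h :: t).length) + 1 := by
          simp only [List.length_cons] at hlen_le ⊢
          omega
        rw [h1, ← List.drop_drop, hsuf]
        rfl
      have ih' : ∀ (p : Nat) (c : PySem.Dict (Int × Int) (List (List Char))),
          p ≤ ref.length → pvGood all ref c →
          (pvSolve all.length ref t p c).1 = pvACore t (ref.drop p) ∧
          pvGood all ref (pvSolve all.length ref t p c).2 :=
        fun p c hp hc => ih p c hsuft hp hc
      rw [pvSolve]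
      cases hget : cache.get? ((all.length : Int) - (((h :: t) : List Int).length : Int),
          (pos : Int)) with
      | some v =>
          simp only []
          obtain ⟨j, p, hj, hp, hv⟩ := hgood _ _ _ hget
          have hj' : j = all.length - (h :: t).length := by
            omega
          have hp' : p = pos := by exact_mod_cast hp.symm
          subst hj' hp'
          refine ⟨?_, hgood⟩
          rw [hv, hsuf]
      | none =>
          simp only []
          obtain ⟨hb1, hb2⟩ := pvSolveBody_correct all ref h t ih' pos cache hpos hgood
          constructor
          · exact hb1
          · intro a b v hv
            rw [PySem.Dict.get?_insert] at hv
            split_ifs at hv with hk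
            · simp only [Prod.mk.injEq] at hk
              obtain ⟨ha, hb⟩ := hk
              refine ⟨all.length - (h :: t).length, pos, ?_, hb, ?_⟩
              · rw [ha]
                simp only [List.length_cons] at hlen_le ⊢
                omega
              · have hv' : v = (pvSolveBody all.length ref (h :: t) pos cache).1 :=
                  (Option.some.inj hv).symm
                rw [hv', hsuf, hb1]
            · exact hb2 _ _ _ hv

-- ===== VERDICT (by name: the statement is the Claim_ definition above) =====
theorem construct_patterns_len_spec : Claim_equal_construct_patterns_len := by
  intro groups ref_p _
  unfold Spec_construct_patterns_len construct_patterns_len construct_patterns_len_alt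
  rw [(pvSolve_correct groups ref_p.toList groups 0 PySem.Dict.empty
      (by simp) (by simp) (pvGood_empty groups ref_p.toList)).1]
  rw [List.drop_zero]
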